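-- pv_equiv track=rewrite | github.com/omoniyi-ipaye/PeopleOS | src/data_loader.py | _fuzzy_match_column
-- ===== SOURCE A (Python) =====
-- from difflib import get_close_matches
-- from typing import Optional, Dict, Any
--
-- GOLDEN_SCHEMA = {
--     'required': [
--         'EmployeeID', 'Dept', 'Tenure', 'Salary', 'LastRating', 'Age', 'Gender',
--         'JobTitle', 'Location', 'HireDate', 'ManagerID'
--     ],
--     'optional': [
--         'Attrition', 'PerformanceText', 'RatingHistory', 'PromotionDate',
--         'StartingSalary', 'YearsInCurrentRole', 'YearsSinceLastPromotion',
--         'PromotionCount', 'InterviewScore', 'AssessmentScore', 'HireSource',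
--         'SnapshotDate', 'Country', 'JobLevel', 'CompaRatio',
--         'PriorExperienceYears', 'ManagerChangeCount'
--     ]
-- }
--
-- COLUMN_ALIASES = {
--     'employeeid': ['emp_id', 'employee_id', 'id', 'empid', 'emp_no', 'employee_no', 'staff_id'],
--     'snapshotdate': ['date', 'month', 'snapshot_date', 'period', 'as_of_date'],
--     'dept': ['department', 'dept_name', 'department_name', 'division', 'team'],
--     'tenure': ['years_of_service', 'yos', 'experience', 'years_employed', 'service_years'],
--     'salary': ['compensation', 'pay', 'wage', 'annual_salary', 'base_salary', 'income'],
--     'lastrating': ['rating', 'performance_rating', 'perf_rating', 'review_score', 'performance_score', 'last_review'],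
--     'age': ['employee_age', 'years_old'],
--     'gender': ['sex'],
--     'jobtitle': ['title', 'role', 'position', 'job_role'],
--     'location': ['office', 'site', 'city', 'region', 'work_location'],
--     'hiredate': ['date_of_hire', 'hired_at', 'joined_date', 'join_date'],
--     'managerid': ['manager_id', 'manager', 'supervisor_id', 'reports_to'],
--     'attrition': ['left', 'departed', 'terminated', 'resigned', 'churned', 'turnover', 'attrition_flag'],
--     'performancetext': ['performance_review', 'review_text', 'feedback', 'comments', 'performance_notes'],
--     'ratinghistory': ['historical_ratings', 'rating_history', 'past_ratings', 'performance_history'],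
--     'promotiondate': ['last_promotion_date', 'date_of_promotion', 'last_promo_date'],
--     'promotioncount': ['promo_count', 'number_of_promotions'],
--     'yearssincelastpromotion': ['years_since_promotion', 'time_since_promotion', 'promotion_lag'],
--     'yearsincurrentrole': ['years_in_role', 'role_tenure', 'time_in_role'],
--     'startingsalary': ['start_salary', 'initial_salary', 'hiring_salary', 'base_pay_start'],
--     'interviewscore': ['interview_avg', 'interview_rating'],
--     'assessmentscore': ['test_score', 'aptitude_score'],
--     'hiresource': ['source', 'recruitment_source', 'hiring_channel', 'referral_source']
-- }
--
-- def _fuzzy_match_column(column: str) -> Optional[str]: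
--     """
--     Match a column name to the Golden Schema using fuzzy matching.
--
--     Args:
--         column: The column name to match.
--
--     Returns:
--         Matched Golden Schema column name or None.
--     """
--     col_lower = column.lower().replace(' ', '_').replace('-', '_')
--
--     # Direct match
--     for golden_col in GOLDEN_SCHEMA['required'] + GOLDEN_SCHEMA['optional']:
--         if col_lower == golden_col.lower():
--             return golden_col
--
--     # Alias match
--     for golden_col, aliases in COLUMN_ALIASES.items():
--         if col_lower in aliases or col_lower == golden_col:
--             # Convert back to proper case
--             for gc in GOLDEN_SCHEMA['required'] + GOLDEN_SCHEMA['optional']: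
--                 if gc.lower() == golden_col:
--                     return gc
--
--     # Fuzzy match using difflib
--     all_golden = [c.lower() for c in GOLDEN_SCHEMA['required'] + GOLDEN_SCHEMA['optional']]
--     matches = get_close_matches(col_lower, all_golden, n=1, cutoff=0.6)
--
--     if matches:
--         for gc in GOLDEN_SCHEMA['required'] + GOLDEN_SCHEMA['optional']:
--             if gc.lower() == matches[0]:
--                 return gc
--
--     return None
-- ===== SOURCE B (Python) =====
-- # Column-name resolver: one flat lookup table of accepted spellings plus a
-- # Ratcliff-Obershelp fuzzy fallback for near-miss spellings.
--
-- _TABLE = {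
--     'employeeid': 'EmployeeID',
--     'dept': 'Dept',
--     'tenure': 'Tenure',
--     'salary': 'Salary',
--     'lastrating': 'LastRating',
--     'age': 'Age',
--     'gender': 'Gender',
--     'jobtitle': 'JobTitle',
--     'location': 'Location',
--     'hiredate': 'HireDate',
--     'managerid': 'ManagerID',
--     'attrition': 'Attrition',
--     'performancetext': 'PerformanceText',
--     'ratinghistory': 'RatingHistory',
--     'promotiondate': 'PromotionDate',
--     'startingsalary': 'StartingSalary',
--     'yearsincurrentrole': 'YearsInCurrentRole',
--     'yearssincelastpromotion': 'YearsSinceLastPromotion',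
--     'promotioncount': 'PromotionCount',
--     'interviewscore': 'InterviewScore',
--     'assessmentscore': 'AssessmentScore',
--     'hiresource': 'HireSource',
--     'snapshotdate': 'SnapshotDate',
--     'country': 'Country',
--     'joblevel': 'JobLevel',
--     'comparatio': 'CompaRatio',
--     'priorexperienceyears': 'PriorExperienceYears',
--     'managerchangecount': 'ManagerChangeCount',
--     'emp_id': 'EmployeeID',
--     'employee_id': 'EmployeeID',
--     'id': 'EmployeeID',
--     'empid': 'EmployeeID',
--     'emp_no': 'EmployeeID',
--     'employee_no': 'EmployeeID',
--     'staff_id': 'EmployeeID',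
--     'date': 'SnapshotDate',
--     'month': 'SnapshotDate',
--     'snapshot_date': 'SnapshotDate',
--     'period': 'SnapshotDate',
--     'as_of_date': 'SnapshotDate',
--     'department': 'Dept',
--     'dept_name': 'Dept',
--     'department_name': 'Dept',
--     'division': 'Dept',
--     'team': 'Dept',
--     'years_of_service': 'Tenure',
--     'yos': 'Tenure',
--     'experience': 'Tenure',
--     'years_employed': 'Tenure',
--     'service_years': 'Tenure',
--     'compensation': 'Salary',
--     'pay': 'Salary',
--     'wage': 'Salary',
--     'annual_salary': 'Salary',
--     'base_salary': 'Salary',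
--     'income': 'Salary',
--     'rating': 'LastRating',
--     'performance_rating': 'LastRating',
--     'perf_rating': 'LastRating',
--     'review_score': 'LastRating',
--     'performance_score': 'LastRating',
--     'last_review': 'LastRating',
--     'employee_age': 'Age',
--     'years_old': 'Age',
--     'sex': 'Gender',
--     'title': 'JobTitle',
--     'role': 'JobTitle',
--     'position': 'JobTitle',
--     'job_role': 'JobTitle',
--     'office': 'Location',
--     'site': 'Location',
--     'city': 'Location',
--     'region': 'Location',
--     'work_location': 'Location',
--     'date_of_hire': 'HireDate',
--     'hired_at': 'HireDate',
--     'joined_date': 'HireDate',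
--     'join_date': 'HireDate',
--     'manager_id': 'ManagerID',
--     'manager': 'ManagerID',
--     'supervisor_id': 'ManagerID',
--     'reports_to': 'ManagerID',
--     'left': 'Attrition',
--     'departed': 'Attrition',
--     'terminated': 'Attrition',
--     'resigned': 'Attrition',
--     'churned': 'Attrition',
--     'turnover': 'Attrition',
--     'attrition_flag': 'Attrition',
--     'performance_review': 'PerformanceText',
--     'review_text': 'PerformanceText',
--     'feedback': 'PerformanceText',
--     'comments': 'PerformanceText',
--     'performance_notes': 'PerformanceText',
--     'historical_ratings': 'RatingHistory',
--     'rating_history': 'RatingHistory',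
--     'past_ratings': 'RatingHistory',
--     'performance_history': 'RatingHistory',
--     'last_promotion_date': 'PromotionDate',
--     'date_of_promotion': 'PromotionDate',
--     'last_promo_date': 'PromotionDate',
--     'promo_count': 'PromotionCount',
--     'number_of_promotions': 'PromotionCount',
--     'years_since_promotion': 'YearsSinceLastPromotion',
--     'time_since_promotion': 'YearsSinceLastPromotion',
--     'promotion_lag': 'YearsSinceLastPromotion',
--     'years_in_role': 'YearsInCurrentRole',
--     'role_tenure': 'YearsInCurrentRole',
--     'time_in_role': 'YearsInCurrentRole',
--     'start_salary': 'StartingSalary',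
--     'initial_salary': 'StartingSalary',
--     'hiring_salary': 'StartingSalary',
--     'base_pay_start': 'StartingSalary',
--     'interview_avg': 'InterviewScore',
--     'interview_rating': 'InterviewScore',
--     'test_score': 'AssessmentScore',
--     'aptitude_score': 'AssessmentScore',
--     'source': 'HireSource',
--     'recruitment_source': 'HireSource',
--     'hiring_channel': 'HireSource',
--     'referral_source': 'HireSource',
-- }
--
-- _GOLDEN_LOWER = ['employeeid', 'dept', 'tenure', 'salary', 'lastrating', 'age', 'gender', 'jobtitle', 'location', 'hiredate', 'managerid', 'attrition', 'performancetext', 'ratinghistory', 'promotiondate', 'startingsalary', 'yearsincurrentrole', 'yearssincelastpromotion', 'promotioncount', 'interviewscore', 'assessmentscore', 'hiresource', 'snapshotdate', 'country', 'joblevel', 'comparatio', 'priorexperienceyears', 'managerchangecount']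
--
--
-- def _longest_block(a, b):
--     """Longest common substring of a and b: (start_a, start_b, length)."""
--     bi = bj = size = 0
--     for i in range(len(a)):
--         for j in range(len(b)):
--             k = 0
--             while i + k < len(a) and j + k < len(b) and a[i + k] == b[j + k]:
--                 k += 1
--             if k > size:
--                 bi, bj, size = i, j, k
--     return bi, bj, size
--
--
-- def _match_total(a, b):
--     """Total length matched, recursively splitting around the longest block."""
--     i, j, k = _longest_block(a, b)
--     if k == 0:
--         return 0
--     return _match_total(a[:i], b[:j]) + k + _match_total(a[i + k:], b[j + k:])
--
--
-- def _similarity(a, b):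
--     """Ratcliff-Obershelp similarity: 2 * matched / (len(a) + len(b))."""
--     return 2 * _match_total(a, b) / (len(a) + len(b))
--
--
-- def _fuzzy_match_column(column):
--     key = column.lower().replace(' ', '_').replace('-', '_')
--     hit = _TABLE.get(key)
--     if hit is not None:
--         return hit
--     best = max((_similarity(g, key), g) for g in _GOLDEN_LOWER)
--     if best[0] >= 0.6:
--         return _TABLE[best[1]]
--     return None
-- ===== Notes on version B (the rewrite author's own statement) =====
-- stated objective: alternative
-- what changed: A's three sequential scanning loops (golden scan, alias scan with a nested proper-case scan, and a post-fuzzy proper-case scan) are replaced by one flat literal lookup table mapping every accepted spelling to its canonical name, consulted once directly and once to map the fuzzy hit back to proper case, and A's difflib.get_close_matches call (best-passing-candidate fold with quick-reject guards) is replaced by a plain Ratcliff-Obershelp similarity scored for every candidate followed by max over (score, name) pairs and a single 0.6 threshold check; …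
import Mathlib
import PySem

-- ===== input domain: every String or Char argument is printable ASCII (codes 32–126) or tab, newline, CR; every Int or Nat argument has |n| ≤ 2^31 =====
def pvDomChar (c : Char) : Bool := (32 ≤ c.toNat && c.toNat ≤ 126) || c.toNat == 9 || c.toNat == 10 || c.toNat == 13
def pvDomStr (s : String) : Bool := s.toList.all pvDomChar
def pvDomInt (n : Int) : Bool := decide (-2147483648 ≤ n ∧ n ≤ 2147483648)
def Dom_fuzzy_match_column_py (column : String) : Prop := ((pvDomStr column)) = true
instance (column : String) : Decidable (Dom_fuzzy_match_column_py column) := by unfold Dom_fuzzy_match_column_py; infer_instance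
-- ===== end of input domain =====

-- B replaces A's three scanning loops by one flat literal lookup table consulted twice, and
-- replaces A's difflib call (best-passing-candidate fold with quick-reject guards) by a plain
-- Ratcliff–Obershelp similarity scored for every candidate and a max over (score, name) pairs;
-- objective: simpler.

-- ===== PORT A =====
-- module constants of Source A: GOLDEN_SCHEMA['required'] ++ GOLDEN_SCHEMA['optional'], COLUMN_ALIASES
def pvGolden : List String :=
  ["EmployeeID", "Dept", "Tenure", "Salary", "LastRating", "Age", "Gender", "JobTitle", "Location", "HireDate", "ManagerID", "Attrition", "PerformanceText", "RatingHistory", "PromotionDate", "StartingSalary", "YearsInCurrentRole", "YearsSinceLastPromotion", "PromotionCount", "InterviewScore", "AssessmentScore", "HireSource", "SnapshotDate", "Country", "JobLevel", "CompaRatio", "PriorExperienceYears", "ManagerChangeCount"]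

def pvAliases : List (String × List String) :=
  [("employeeid", ["emp_id", "employee_id", "id", "empid", "emp_no", "employee_no", "staff_id"]),
   ("snapshotdate", ["date", "month", "snapshot_date", "period", "as_of_date"]),
   ("dept", ["department", "dept_name", "department_name", "division", "team"]),
   ("tenure", ["years_of_service", "yos", "experience", "years_employed", "service_years"]),
   ("salary", ["compensation", "pay", "wage", "annual_salary", "base_salary", "income"]),
   ("lastrating", ["rating", "performance_rating", "perf_rating", "review_score", "performance_score", "last_review"]),
   ("age", ["employee_age", "years_old"]),
   ("gender", ["sex"]),
   ("jobtitle", ["title", "role", "position", "job_role"]),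
   ("location", ["office", "site", "city", "region", "work_location"]),
   ("hiredate", ["date_of_hire", "hired_at", "joined_date", "join_date"]),
   ("managerid", ["manager_id", "manager", "supervisor_id", "reports_to"]),
   ("attrition", ["left", "departed", "terminated", "resigned", "churned", "turnover", "attrition_flag"]),
   ("performancetext", ["performance_review", "review_text", "feedback", "comments", "performance_notes"]),
   ("ratinghistory", ["historical_ratings", "rating_history", "past_ratings", "performance_history"]),
   ("promotiondate", ["last_promotion_date", "date_of_promotion", "last_promo_date"]),
   ("promotioncount", ["promo_count", "number_of_promotions"]),
   ("yearssincelastpromotion", ["years_since_promotion", "time_since_promotion", "promotion_lag"]),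
   ("yearsincurrentrole", ["years_in_role", "role_tenure", "time_in_role"]),
   ("startingsalary", ["start_salary", "initial_salary", "hiring_salary", "base_pay_start"]),
   ("interviewscore", ["interview_avg", "interview_rating"]),
   ("assessmentscore", ["test_score", "aptitude_score"]),
   ("hiresource", ["source", "recruitment_source", "hiring_channel", "referral_source"])]

-- A calls difflib.get_close_matches(word, poss, n=1, cutoff=0.6); the pv* functions below are a
-- hand port of that call.  Exactness notes: get_close_matches keeps a candidate iff ratio() ≥
-- cutoff (real_quick_ratio/quick_ratio are upper bounds of ratio, so those guards change nothing
-- beyond skipping work; the min-length guard below is exactly real_quick_ratio < cutoff);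
-- ratio() = 2*M/T is compared as an exact integer inequality 10*M ≥ 3*T, which agrees with
-- CPython's float comparison for the denominators occurring here; SequenceMatcher autojunk never
-- fires for seq2 shorter than 200 characters, and longer words are rejected by the length guard;
-- find_longest_match returns the longest common substring, earliest in a, then earliest in b;
-- heapq.nlargest(1, [(ratio, x) …]) breaks ratio ties towards the lexicographically larger x.

-- common prefix length of two character lists
def pvCPL : List Char → List Char → Nat
  | a :: as, b :: bs => if a = b then pvCPL as bs + 1 else 0
  | _, _ => 0

-- find_longest_match over the whole strings: longest common substring, earliest start in a, then in b
def pvFLM (a b : List Char) : Nat × Nat × Nat :=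
  (List.range a.length).foldl (fun best i =>
    (List.range b.length).foldl (fun best j =>
      let k := pvCPL (a.drop i) (b.drop j)
      if best.2.2 < k then (i, j, k) else best) best) (0, 0, 0)

-- total size of the matching blocks (sum over get_matching_blocks); fuel bounds the recursion depth
def pvMTotal : Nat → List Char → List Char → Nat
  | 0, _, _ => 0
  | fuel + 1, a, b =>
    let r := pvFLM a b
    if r.2.2 = 0 then 0
    else pvMTotal fuel (a.take r.1) (b.take r.2.1) + r.2.2 +
         pvMTotal fuel (a.drop (r.1 + r.2.2)) (b.drop (r.2.1 + r.2.2))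

-- Python's '>' on strings (code-point lexicographic), used for heapq.nlargest tie-breaking
def pvLexGt : List Char → List Char → Bool
  | _ :: _, [] => true
  | [], _ => false
  | a :: as, b :: bs => if b < a then true else if a < b then false else pvLexGt as bs

-- one candidate step of get_close_matches: keep it if ratio ≥ 0.6 and it beats the current best
def pvGCMStep (word : String) (best : Option (Nat × Nat × String)) (x : String) :
    Option (Nat × Nat × String) :=
  let T := x.toList.length + word.toList.length
  if 10 * min x.toList.length word.toList.length < 3 * T then best  -- M ≤ min, ratio can't reach 0.6
  else
  let M := pvMTotal (x.toList.length + word.toList.length + 1) x.toList word.toList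
  if 3 * T ≤ 10 * M then          -- 2*M/T ≥ 0.6, exactly
    match best with
    | none => some (M, T, x)
    | some (M', T', x') =>
      if M' * T < M * T' then some (M, T, x)
      else if M * T' = M' * T && pvLexGt x.toList x'.toList then some (M, T, x)
      else best
  else best

def pvGCMBest (word : String) : List String → Option (Nat × Nat × String) →
    Option (Nat × Nat × String)
  | [], best => best
  | x :: rest, best => pvGCMBest word rest (pvGCMStep word best x)

-- get_close_matches(word, poss, n=1, cutoff=0.6): the single best match, if any
def pvGCM1 (word : String) (poss : List String) : Option String :=
  (pvGCMBest word poss none).map (fun t => t.2.2)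

-- the alias loop of A: for golden_col, aliases in COLUMN_ALIASES.items(): …
def pvAliasScan (col : String) : List (String × List String) → Option String
  | [] => none
  | (g, as) :: rest =>
    if as.contains col || col == g then
      match pvGolden.find? (fun gc => PySem.Str.lower gc == g) with
      | some gc => some gc
      | none => pvAliasScan col rest
    else pvAliasScan col rest

def fuzzy_match_column_py (column : String) : Option String :=
  let col := PySem.Str.replace (PySem.Str.replace (PySem.Str.lower column) " " "_") "-" "_"
  match pvGolden.find? (fun g => col == PySem.Str.lower g) with   -- direct match
  | some g => some g
  | none =>
    match pvAliasScan col pvAliases with                          -- alias match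
    | some g => some g
    | none =>
      match pvGCM1 col (pvGolden.map (fun c => PySem.Str.lower c)) with   -- fuzzy match
      | some m => pvGolden.find? (fun gc => PySem.Str.lower gc == m)
      | none => none

-- ===== PORT B =====
-- Source B's module constants: the literal _TABLE dict and the literal _GOLDEN_LOWER list
def pvTable : PySem.Dict String String := PySem.Dict.mk
  [("employeeid", "EmployeeID"),
   ("dept", "Dept"),
   ("tenure", "Tenure"),
   ("salary", "Salary"),
   ("lastrating", "LastRating"),
   ("age", "Age"),
   ("gender", "Gender"),
   ("jobtitle", "JobTitle"),
   ("location", "Location"),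
   ("hiredate", "HireDate"),
   ("managerid", "ManagerID"),
   ("attrition", "Attrition"),
   ("performancetext", "PerformanceText"),
   ("ratinghistory", "RatingHistory"),
   ("promotiondate", "PromotionDate"),
   ("startingsalary", "StartingSalary"),
   ("yearsincurrentrole", "YearsInCurrentRole"),
   ("yearssincelastpromotion", "YearsSinceLastPromotion"),
   ("promotioncount", "PromotionCount"),
   ("interviewscore", "InterviewScore"),
   ("assessmentscore", "AssessmentScore"),
   ("hiresource", "HireSource"),
   ("snapshotdate", "SnapshotDate"),
   ("country", "Country"),
   ("joblevel", "JobLevel"),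
   ("comparatio", "CompaRatio"),
   ("priorexperienceyears", "PriorExperienceYears"),
   ("managerchangecount", "ManagerChangeCount"),
   ("emp_id", "EmployeeID"),
   ("employee_id", "EmployeeID"),
   ("id", "EmployeeID"),
   ("empid", "EmployeeID"),
   ("emp_no", "EmployeeID"),
   ("employee_no", "EmployeeID"),
   ("staff_id", "EmployeeID"),
   ("date", "SnapshotDate"),
   ("month", "SnapshotDate"),
   ("snapshot_date", "SnapshotDate"),
   ("period", "SnapshotDate"),
   ("as_of_date", "SnapshotDate"),
   ("department", "Dept"),
   ("dept_name", "Dept"),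
   ("department_name", "Dept"),
   ("division", "Dept"),
   ("team", "Dept"),
   ("years_of_service", "Tenure"),
   ("yos", "Tenure"),
   ("experience", "Tenure"),
   ("years_employed", "Tenure"),
   ("service_years", "Tenure"),
   ("compensation", "Salary"),
   ("pay", "Salary"),
   ("wage", "Salary"),
   ("annual_salary", "Salary"),
   ("base_salary", "Salary"),
   ("income", "Salary"),
   ("rating", "LastRating"),
   ("performance_rating", "LastRating"),
   ("perf_rating", "LastRating"),
   ("review_score", "LastRating"),
   ("performance_score", "LastRating"),
   ("last_review", "LastRating"),
   ("employee_age", "Age"),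
   ("years_old", "Age"),
   ("sex", "Gender"),
   ("title", "JobTitle"),
   ("role", "JobTitle"),
   ("position", "JobTitle"),
   ("job_role", "JobTitle"),
   ("office", "Location"),
   ("site", "Location"),
   ("city", "Location"),
   ("region", "Location"),
   ("work_location", "Location"),
   ("date_of_hire", "HireDate"),
   ("hired_at", "HireDate"),
   ("joined_date", "HireDate"),
   ("join_date", "HireDate"),
   ("manager_id", "ManagerID"),
   ("manager", "ManagerID"),
   ("supervisor_id", "ManagerID"),
   ("reports_to", "ManagerID"),
   ("left", "Attrition"),
   ("departed", "Attrition"),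
   ("terminated", "Attrition"),
   ("resigned", "Attrition"),
   ("churned", "Attrition"),
   ("turnover", "Attrition"),
   ("attrition_flag", "Attrition"),
   ("performance_review", "PerformanceText"),
   ("review_text", "PerformanceText"),
   ("feedback", "PerformanceText"),
   ("comments", "PerformanceText"),
   ("performance_notes", "PerformanceText"),
   ("historical_ratings", "RatingHistory"),
   ("rating_history", "RatingHistory"),
   ("past_ratings", "RatingHistory"),
   ("performance_history", "RatingHistory"),
   ("last_promotion_date", "PromotionDate"),
   ("date_of_promotion", "PromotionDate"),
   ("last_promo_date", "PromotionDate"),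
   ("promo_count", "PromotionCount"),
   ("number_of_promotions", "PromotionCount"),
   ("years_since_promotion", "YearsSinceLastPromotion"),
   ("time_since_promotion", "YearsSinceLastPromotion"),
   ("promotion_lag", "YearsSinceLastPromotion"),
   ("years_in_role", "YearsInCurrentRole"),
   ("role_tenure", "YearsInCurrentRole"),
   ("time_in_role", "YearsInCurrentRole"),
   ("start_salary", "StartingSalary"),
   ("initial_salary", "StartingSalary"),
   ("hiring_salary", "StartingSalary"),
   ("base_pay_start", "StartingSalary"),
   ("interview_avg", "InterviewScore"),
   ("interview_rating", "InterviewScore"),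
   ("test_score", "AssessmentScore"),
   ("aptitude_score", "AssessmentScore"),
   ("source", "HireSource"),
   ("recruitment_source", "HireSource"),
   ("hiring_channel", "HireSource"),
   ("referral_source", "HireSource")]

def pvGoldenLower : List String :=
  ["employeeid", "dept", "tenure", "salary", "lastrating", "age", "gender", "jobtitle", "location", "hiredate", "managerid", "attrition", "performancetext", "ratinghistory", "promotiondate", "startingsalary", "yearsincurrentrole", "yearssincelastpromotion", "promotioncount", "interviewscore", "assessmentscore", "hiresource", "snapshotdate", "country", "joblevel", "comparatio", "priorexperienceyears", "managerchangecount"]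

-- _longest_block(a, b): nested index loops with an inner while; the while over a[i+k] == b[j+k]
-- is the common prefix run of the two suffixes
def pvRun : List Char → List Char → Nat
  | a :: as, b :: bs => if a = b then pvRun as bs + 1 else 0
  | _, _ => 0

def pvBlock (a b : List Char) : Nat × Nat × Nat :=
  (List.range a.length).foldl (fun acc i =>
    (List.range b.length).foldl (fun acc j =>
      let k := pvRun (a.drop i) (b.drop j)
      if acc.2.2 < k then (i, j, k) else acc) acc) (0, 0, 0)

-- _match_total(a, b): plain recursion on the two slices around the longest block; ported with a
-- fuel bound (|a| + |b| suffices) that only makes the same recursion total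
def pvMatchTotal : Nat → List Char → List Char → Nat
  | 0, _, _ => 0
  | fuel + 1, a, b =>
    let r := pvBlock a b
    if r.2.2 = 0 then 0
    else pvMatchTotal fuel (a.take r.1) (b.take r.2.1) + r.2.2 +
         pvMatchTotal fuel (a.drop (r.1 + r.2.2)) (b.drop (r.2.1 + r.2.2))

-- (_similarity(g, key), g): the float 2*m/total is carried as the exact pair (m, total); tuple
-- comparison and the 0.6 threshold below are cross-multiplied integer comparisons, which agree
-- with CPython's float comparisons for these magnitudes
def pvScore (w g : String) : (Nat × Nat) × String :=
  ((pvMatchTotal (g.toList.length + w.toList.length + 1) g.toList w.toList,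
    g.toList.length + w.toList.length), g)

-- Python '>' on (similarity, name) pairs: larger ratio, or equal ratio and larger name
def pvGtPair (p q : (Nat × Nat) × String) : Bool :=
  decide (q.1.1 * p.1.2 < p.1.1 * q.1.2) ||
  (decide (p.1.1 * q.1.2 = q.1.1 * p.1.2) && pvLexGt p.2.toList q.2.toList)

-- max(scored): first element, improved only by strictly greater pairs (Python max keeps ties)
def pvMaxPair : List ((Nat × Nat) × String) → Option ((Nat × Nat) × String)
  | [] => none
  | s :: rest => some (rest.foldl (fun best p => if pvGtPair p best then p else best) s)

def fuzzy_match_column_py_alt (column : String) : Option String :=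
  let key := PySem.Str.replace (PySem.Str.replace (PySem.Str.lower column) " " "_") "-" "_"
  match pvTable.get? key with                                 -- _TABLE.get(key)
  | some hit => some hit
  | none =>
    match pvMaxPair (pvGoldenLower.map (fun g => pvScore key g)) with   -- max(scored pairs)
    | some best =>
      if 3 * best.1.2 ≤ 10 * best.1.1 then pvTable.get? best.2   -- best[0] >= 0.6 → _TABLE[best[1]]
      else none
    | none => none

-- ===== PRECONDITION & SPEC =====
def Spec_fuzzy_match_column_py (column : String) (out : Option String) : Prop := out = fuzzy_match_column_py_alt column
instance (column : String) (out : Option String) : Decidable (Spec_fuzzy_match_column_py column out) := by unfold Spec_fuzzy_match_column_py; infer_instance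

-- ===== CLAIM (what is proved, stated in full; the proofs are below) =====
def Claim_equal_fuzzy_match_column_py : Prop := ∀ (column : String), Dom_fuzzy_match_column_py column → Spec_fuzzy_match_column_py column (fuzzy_match_column_py column)

-- ===== LEMMAS AND PROOFS =====
set_option maxRecDepth 100000
set_option maxHeartbeats 1000000

-- ---- table facts ----
lemma pvKeys_lit : pvTable.keys = ["employeeid", "dept", "tenure", "salary", "lastrating", "age", "gender", "jobtitle", "location", "hiredate", "managerid", "attrition", "performancetext", "ratinghistory", "promotiondate", "startingsalary", "yearsincurrentrole", "yearssincelastpromotion", "promotioncount", "interviewscore", "assessmentscore", "hiresource", "snapshotdate", "country", "joblevel", "comparatio", "priorexperienceyears", "managerchangecount", "emp_id", "employee_id", "id", "empid", "emp_no", "employee_no", "staff_id", "date", "month", "snapshot_date", "period", "as_of_date", "department", "dept_name", "department_name", "division", "team", "years_of_service", "yos", "experience", "years_employed", "service_years", "compensation", "pay", "wage", "annual_salary", "base_salary", "income", "rating", "performance_rating", "perf_rating", "review_score", "performance_score", "last_review", "employee_age", "years_old", "sex", "title", "role", "position", "job_role", "office", "site", "city", "region", "work_location", "date_of_hire", "hired_at",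 "joined_date", "join_date", "manager_id", "manager", "supervisor_id", "reports_to", "left", "departed", "terminated", "resigned", "churned", "turnover", "attrition_flag", "performance_review", "review_text", "feedback", "comments", "performance_notes", "historical_ratings", "rating_history", "past_ratings", "performance_history", "last_promotion_date", "date_of_promotion", "last_promo_date", "promo_count", "number_of_promotions", "years_since_promotion", "time_since_promotion", "promotion_lag", "years_in_role", "role_tenure", "time_in_role", "start_salary", "initial_salary", "hiring_salary", "base_pay_start", "interview_avg", "interview_rating", "test_score", "aptitude_score", "source", "recruitment_source", "hiring_channel", "referral_source"] := by decide

lemma pvGoldenLower_lit : pvGolden.map (fun g => PySem.Str.lower g) = pvGoldenLower := by decide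

lemma golden_mem_keys : ∀ g ∈ pvGolden, PySem.Str.lower g ∈ pvTable.keys := by decide

lemma alias_mem_keys : ∀ p ∈ pvAliases, p.1 ∈ pvTable.keys ∧ ∀ a ∈ p.2, a ∈ pvTable.keys := by decide

lemma goldenLower_nonempty : ∀ g ∈ pvGoldenLower, g.toList ≠ [] := by decide

lemma pvAliasScan_eq_none (col : String) :
    ∀ L : List (String × List String),
      (∀ p ∈ L, col ∉ p.2 ∧ col ≠ p.1) → pvAliasScan col L = none := by
  intro L
  induction L with
  | nil => intro _; rfl
  | cons p rest ih =>
    intro h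
    obtain ⟨hna, hnk⟩ := h p (List.mem_cons_self ..)
    obtain ⟨g, as⟩ := p
    have h1 : as.contains col = false := by
      simp only [List.contains_eq_mem, decide_eq_false_iff_not]
      exact hna
    have h2 : (col == g) = false := by simpa using hnk
    simp only [pvAliasScan, h1, h2, Bool.or_self, Bool.false_eq_true, if_false]
    exact ih (fun q hq => h q (List.mem_cons_of_mem _ hq))

-- ---- B's longest block / match total coincide with A's difflib port ----
lemma pvRun_eq_pvCPL : ∀ a b : List Char, pvRun a b = pvCPL a b := by
  intro a
  induction a with
  | nil => intro b; cases b <;> rfl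
  | cons x as ih =>
    intro b
    cases b with
    | nil => rfl
    | cons y bs => simp only [pvRun, pvCPL, ih]

lemma pvBlock_eq_pvFLM (a b : List Char) : pvBlock a b = pvFLM a b := by
  unfold pvBlock pvFLM
  simp only [pvRun_eq_pvCPL]

lemma pvMatchTotal_eq_pvMTotal : ∀ (fuel : Nat) (a b : List Char),
    pvMatchTotal fuel a b = pvMTotal fuel a b := by
  intro fuel
  induction fuel with
  | zero => intro a b; rfl
  | succ f ih =>
    intro a b
    simp only [pvMatchTotal, pvMTotal, pvBlock_eq_pvFLM, ih]

lemma pvScore_eq (w g : String) :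
    pvScore w g = ((pvMTotal (g.toList.length + w.toList.length + 1) g.toList w.toList,
      g.toList.length + w.toList.length), g) := by
  simp only [pvScore, pvMatchTotal_eq_pvMTotal]

-- ---- M is at most each length ----
lemma pvCPL_le_left : ∀ a b : List Char, pvCPL a b ≤ a.length := by
  intro a
  induction a with
  | nil => intro b; cases b <;> simp [pvCPL]
  | cons x as ih =>
    intro b
    cases b with
    | nil => simp [pvCPL]
    | cons y bs =>
      simp only [pvCPL, List.length_cons]
      split_ifs
      · exact Nat.succ_le_succ (ih bs)
      · exact Nat.zero_le _

lemma pvCPL_le_right : ∀ a b : List Char, pvCPL a b ≤ b.length := by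
  intro a
  induction a with
  | nil => intro b; cases b <;> simp [pvCPL]
  | cons x as ih =>
    intro b
    cases b with
    | nil => simp [pvCPL]
    | cons y bs =>
      simp only [pvCPL, List.length_cons]
      split_ifs
      · exact Nat.succ_le_succ (ih bs)
      · exact Nat.zero_le _

-- the block returned by pvFLM fits inside both strings
lemma pvFLM_bounds (a b : List Char) :
    (pvFLM a b).1 + (pvFLM a b).2.2 ≤ a.length ∧ (pvFLM a b).2.1 + (pvFLM a b).2.2 ≤ b.length := by
  unfold pvFLM
  refine List.foldlRecOn
    (motive := fun r : Nat × Nat × Nat => r.1 + r.2.2 ≤ a.length ∧ r.2.1 + r.2.2 ≤ b.length)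
    _ _ ⟨Nat.zero_le _, Nat.zero_le _⟩ ?_
  intro acc hacc i _
  refine List.foldlRecOn
    (motive := fun r : Nat × Nat × Nat => r.1 + r.2.2 ≤ a.length ∧ r.2.1 + r.2.2 ≤ b.length)
    _ _ hacc ?_
  intro acc' hacc' j _
  by_cases hk : acc'.2.2 < pvCPL (a.drop i) (b.drop j)
  · simp only [hk, if_pos]
    constructor
    · have := pvCPL_le_left (a.drop i) (b.drop j)
      simp only [List.length_drop] at this
      omega
    · have := pvCPL_le_right (a.drop i) (b.drop j)
      simp only [List.length_drop] at this
      omega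
  · simpa only [hk, if_neg, if_false] using hacc'

lemma pvMTotal_le_left : ∀ (fuel : Nat) (a b : List Char), pvMTotal fuel a b ≤ a.length := by
  intro fuel
  induction fuel with
  | zero => intro a b; exact Nat.zero_le _
  | succ f ih =>
    intro a b
    show (let r := pvFLM a b; if r.2.2 = 0 then 0
      else pvMTotal f (a.take r.1) (b.take r.2.1) + r.2.2 +
           pvMTotal f (a.drop (r.1 + r.2.2)) (b.drop (r.2.1 + r.2.2))) ≤ a.length
    obtain ⟨h1, _⟩ := pvFLM_bounds a b
    by_cases h0 : (pvFLM a b).2.2 = 0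
    · simp only [h0, if_pos]; exact Nat.zero_le _
    · simp only [h0, if_false]
      have hL := ih (a.take (pvFLM a b).1) (b.take (pvFLM a b).2.1)
      have hR := ih (a.drop ((pvFLM a b).1 + (pvFLM a b).2.2))
                    (b.drop ((pvFLM a b).2.1 + (pvFLM a b).2.2))
      simp only [List.length_take, List.length_drop] at hL hR
      omega

lemma pvMTotal_le_right : ∀ (fuel : Nat) (a b : List Char), pvMTotal fuel a b ≤ b.length := by
  intro fuel
  induction fuel with
  | zero => intro a b; exact Nat.zero_le _
  | succ f ih =>
    intro a b
    show (let r := pvFLM a b; if r.2.2 = 0 then 0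
      else pvMTotal f (a.take r.1) (b.take r.2.1) + r.2.2 +
           pvMTotal f (a.drop (r.1 + r.2.2)) (b.drop (r.2.1 + r.2.2))) ≤ b.length
    obtain ⟨_, h2⟩ := pvFLM_bounds a b
    by_cases h0 : (pvFLM a b).2.2 = 0
    · simp only [h0, if_pos]; exact Nat.zero_le _
    · simp only [h0, if_false]
      have hL := ih (a.take (pvFLM a b).1) (b.take (pvFLM a b).2.1)
      have hR := ih (a.drop ((pvFLM a b).1 + (pvFLM a b).2.2))
                    (b.drop ((pvFLM a b).2.1 + (pvFLM a b).2.2))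
      simp only [List.length_take, List.length_drop] at hL hR
      omega

-- ---- relating A's filtered best-fold and B's overall max ----
-- A-side-language score of a candidate (pvScore with pvMatchTotal rewritten to pvMTotal)
def pvScoreN (w g : String) : (Nat × Nat) × String :=
  ((pvMTotal (g.toList.length + w.toList.length + 1) g.toList w.toList,
    g.toList.length + w.toList.length), g)

-- one step of B's max as a fold over an Option accumulator
def pvBStep (b : Option ((Nat × Nat) × String)) (p : (Nat × Nat) × String) :
    Option ((Nat × Nat) × String) :=
  match b with
  | none => some p
  | some q => if pvGtPair p q then some p else some q

-- accB is either empty or the (A-language) score of some nonempty candidate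
def pvShape (w : String) (accB : Option ((Nat × Nat) × String)) : Prop :=
  accB = none ∨ ∃ s : String, accB = some (pvScoreN w s) ∧ s.toList ≠ []

-- the relation: A's accumulator is B's current max if it passes the cutoff, else nothing
def pvRel (accA : Option (Nat × Nat × String)) (accB : Option ((Nat × Nat) × String)) : Prop :=
  match accB with
  | none => accA = none
  | some p => (3 * p.1.2 ≤ 10 * p.1.1 → accA = some (p.1.1, p.1.2, p.2)) ∧
              (¬ 3 * p.1.2 ≤ 10 * p.1.1 → accA = none)

lemma pvMaxPair_eq_foldl : ∀ L : List ((Nat × Nat) × String),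
    pvMaxPair L = L.foldl pvBStep none := by
  intro L
  cases L with
  | nil => rfl
  | cons s rest =>
    show some (rest.foldl (fun best p => if pvGtPair p best then p else best) s)
       = rest.foldl pvBStep (some s)
    induction rest generalizing s with
    | nil => rfl
    | cons p rest ih =>
      show some (rest.foldl _ (if pvGtPair p s then p else s))
         = rest.foldl pvBStep (pvBStep (some s) p)
      by_cases h : pvGtPair p s = true
      · simp only [pvBStep, h, if_pos]; exact ih p
      · simp only [pvBStep, h, if_false, Bool.false_eq_true]; exact ih s

-- small reduction equations for the relation and the step functions
lemma pvRel_some (accA : Option (Nat × Nat × String)) (p : (Nat × Nat) × String) :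
    pvRel accA (some p) =
    ((3 * p.1.2 ≤ 10 * p.1.1 → accA = some (p.1.1, p.1.2, p.2)) ∧
     (¬ 3 * p.1.2 ≤ 10 * p.1.1 → accA = none)) := rfl

lemma pvBStep_noneq (p : (Nat × Nat) × String) : pvBStep none p = some p := rfl

lemma pvBStep_someq (q p : (Nat × Nat) × String) :
    pvBStep (some q) p = if pvGtPair p q then some p else some q := rfl

-- pvGCMStep with the quick-reject guard eliminated (the guard implies the cutoff fails),
-- per constructor of the accumulator
lemma pvGCMStep_none (w x : String) :
    pvGCMStep w none x =
      (if 3 * (x.toList.length + w.toList.length) ≤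
          10 * pvMTotal (x.toList.length + w.toList.length + 1) x.toList w.toList then
        some (pvMTotal (x.toList.length + w.toList.length + 1) x.toList w.toList,
              x.toList.length + w.toList.length, x)
       else none) := by
  have hMl := pvMTotal_le_left (x.toList.length + w.toList.length + 1) x.toList w.toList
  have hMr := pvMTotal_le_right (x.toList.length + w.toList.length + 1) x.toList w.toList
  simp only [pvGCMStep]
  by_cases hg : 10 * min x.toList.length w.toList.length <
      3 * (x.toList.length + w.toList.length)
  · have hnp : ¬ 3 * (x.toList.length + w.toList.length) ≤
        10 * pvMTotal (x.toList.length + w.toList.length + 1) x.toList w.toList := by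
      omega
    rw [if_pos hg, if_neg hnp]
  · rw [if_neg hg]

lemma pvGCMStep_somet (w x : String) (M' T' : Nat) (x' : String) :
    pvGCMStep w (some (M', T', x')) x =
      (if 3 * (x.toList.length + w.toList.length) ≤
          10 * pvMTotal (x.toList.length + w.toList.length + 1) x.toList w.toList then
        (if M' * (x.toList.length + w.toList.length) <
            pvMTotal (x.toList.length + w.toList.length + 1) x.toList w.toList * T' then
          some (pvMTotal (x.toList.length + w.toList.length + 1) x.toList w.toList,
                x.toList.length + w.toList.length, x)
         else if (decide (pvMTotal (x.toList.length + w.toList.length + 1) x.toList w.toList * T'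
              = M' * (x.toList.length + w.toList.length)) && pvLexGt x.toList x'.toList) = true then
          some (pvMTotal (x.toList.length + w.toList.length + 1) x.toList w.toList,
                x.toList.length + w.toList.length, x)
         else some (M', T', x'))
       else some (M', T', x')) := by
  have hMl := pvMTotal_le_left (x.toList.length + w.toList.length + 1) x.toList w.toList
  have hMr := pvMTotal_le_right (x.toList.length + w.toList.length + 1) x.toList w.toList
  simp only [pvGCMStep]
  by_cases hg : 10 * min x.toList.length w.toList.length <
      3 * (x.toList.length + w.toList.length)
  · have hnp : ¬ 3 * (x.toList.length + w.toList.length) ≤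
        10 * pvMTotal (x.toList.length + w.toList.length + 1) x.toList w.toList := by
      omega
    rw [if_pos hg, if_neg hnp]
  · rw [if_neg hg]

-- one parallel step preserves the relation and the accumulator shape
lemma pvStep_rel (w x : String) (hx : x.toList ≠ [])
    (accA : Option (Nat × Nat × String)) (accB : Option ((Nat × Nat) × String))
    (hshape : pvShape w accB) (hrel : pvRel accA accB) :
    pvRel (pvGCMStep w accA x) (pvBStep accB (pvScoreN w x)) ∧
    pvShape w (pvBStep accB (pvScoreN w x)) := by
  set T := x.toList.length + w.toList.length with hT
  set M := pvMTotal (T + 1) x.toList w.toList with hM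
  have hscx : pvScoreN w x = ((M, T), x) := rfl
  have hx0 : x.toList.length ≠ 0 := fun h => hx (List.eq_nil_of_length_eq_zero h)
  have hTpos : 0 < T := by omega
  rcases hshape with hBnone | ⟨s, hBs, hs⟩
  · subst hBnone
    have haccA : accA = none := hrel
    subst haccA
    rw [hscx, pvGCMStep_none, pvBStep_noneq]
    refine ⟨?_, Or.inr ⟨x, by rw [hscx], hx⟩⟩
    rw [pvRel_some]
    by_cases hpass : 3 * T ≤ 10 * M
    · rw [if_pos hpass]; exact ⟨fun _ => rfl, fun h => absurd hpass h⟩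
    · rw [if_neg hpass]; exact ⟨fun h => absurd h hpass, fun _ => rfl⟩
  · subst hBs
    set Ts := s.toList.length + w.toList.length with hTs
    set Ms := pvMTotal (Ts + 1) s.toList w.toList with hMs
    have hscs : pvScoreN w s = ((Ms, Ts), s) := rfl
    have hs0 : s.toList.length ≠ 0 := fun h => hs (List.eq_nil_of_length_eq_zero h)
    have hTspos : 0 < Ts := by omega
    rw [hscs] at hrel ⊢
    rw [pvRel_some] at hrel
    obtain ⟨hq1, hq2⟩ := hrel
    rw [hscx, pvBStep_someq]
    have hgteq : pvGtPair ((M, T), x) ((Ms, Ts), s) =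
        (decide (Ms * T < M * Ts) ||
         (decide (M * Ts = Ms * T) && pvLexGt x.toList s.toList)) := rfl
    by_cases hpass : 3 * T ≤ 10 * M
    · by_cases hpq : 3 * Ts ≤ 10 * Ms
      · have haccA : accA = some (Ms, Ts, s) := hq1 hpq
        subst haccA
        rw [pvGCMStep_somet, if_pos hpass]
        by_cases hlt : Ms * T < M * Ts
        · have hgtt : pvGtPair ((M, T), x) ((Ms, Ts), s) = true := by
            rw [hgteq, decide_eq_true hlt, Bool.true_or]
          rw [if_pos hlt, if_pos hgtt]
          refine ⟨?_, Or.inr ⟨x, by rw [hscx], hx⟩⟩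
          rw [pvRel_some]
          exact ⟨fun _ => rfl, fun h => absurd hpass h⟩
        · rw [if_neg hlt]
          by_cases hand : (decide (M * Ts = Ms * T) && pvLexGt x.toList s.toList) = true
          · have hgtt : pvGtPair ((M, T), x) ((Ms, Ts), s) = true := by
              rw [hgteq, hand, Bool.or_true]
            rw [if_pos hand, if_pos hgtt]
            refine ⟨?_, Or.inr ⟨x, by rw [hscx], hx⟩⟩
            rw [pvRel_some]
            exact ⟨fun _ => rfl, fun h => absurd hpass h⟩
          · have hgtf : ¬ pvGtPair ((M, T), x) ((Ms, Ts), s) = true := by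
              rw [hgteq, decide_eq_false hlt, Bool.false_or,
                Bool.eq_false_iff.mpr hand]
              exact Bool.false_ne_true
            rw [if_neg hand, if_neg hgtf]
            refine ⟨?_, Or.inr ⟨s, by rw [hscs], hs⟩⟩
            rw [pvRel_some]
            exact ⟨fun _ => rfl, fun h => absurd hpq h⟩
      · -- the current max fails the cutoff, the new candidate passes: it strictly wins
        have haccA : accA = none := hq2 hpq
        subst haccA
        rw [pvGCMStep_none, if_pos hpass]
        have hlt : Ms * T < M * Ts := by
          have h1 : (10 * Ms) * T < (3 * Ts) * T :=
            mul_lt_mul_of_pos_right (by omega) hTpos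
          have h2 : (3 * T) * Ts ≤ (10 * M) * Ts := mul_le_mul_right' hpass Ts
          have h3 : 10 * (Ms * T) < 10 * (M * Ts) := by
            calc 10 * (Ms * T) = (10 * Ms) * T := by ring
              _ < (3 * Ts) * T := h1
              _ = (3 * T) * Ts := by ring
              _ ≤ (10 * M) * Ts := h2
              _ = 10 * (M * Ts) := by ring
          exact Nat.lt_of_mul_lt_mul_left h3
        have hgtt : pvGtPair ((M, T), x) ((Ms, Ts), s) = true := by
          rw [hgteq, decide_eq_true hlt, Bool.true_or]
        rw [if_pos hgtt]
        refine ⟨?_, Or.inr ⟨x, by rw [hscx], hx⟩⟩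
        rw [pvRel_some]
        exact ⟨fun _ => rfl, fun h => absurd hpass h⟩
    · -- the new candidate fails the cutoff: A ignores it
      have hstepA : pvGCMStep w accA x = accA := by
        cases haccA : accA with
        | none => rw [pvGCMStep_none, if_neg hpass]
        | some t =>
          obtain ⟨M', T', x'⟩ := t
          rw [pvGCMStep_somet, if_neg hpass]
      rw [hstepA]
      by_cases hgt : pvGtPair ((M, T), x) ((Ms, Ts), s) = true
      ·
        -- the beaten max also fails the cutoff, so A's accumulator is already empty
        have hle : Ms * T ≤ M * Ts := by
          rw [hgteq] at hgt
          rcases Bool.or_eq_true_iff.mp hgt with h | h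
          · exact Nat.le_of_lt (of_decide_eq_true h)
          · exact Nat.le_of_eq (of_decide_eq_true (Bool.and_eq_true_iff.mp h).1).symm
        have hnq : ¬ 3 * Ts ≤ 10 * Ms := by
          intro hq
          apply hpass
          have h1 : (3 * T) * Ts ≤ (10 * M) * Ts := by
            calc (3 * T) * Ts = (3 * Ts) * T := by ring
              _ ≤ (10 * Ms) * T := mul_le_mul_right' (by omega) T
              _ = 10 * (Ms * T) := by ring
              _ ≤ 10 * (M * Ts) := by omega
              _ = (10 * M) * Ts := by ring
          exact Nat.le_of_mul_le_mul_right h1 hTspos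
        have haccA : accA = none := hq2 hnq
        subst haccA
        rw [if_pos hgt]
        refine ⟨?_, Or.inr ⟨x, by rw [hscx], hx⟩⟩
        rw [pvRel_some]
        exact ⟨fun h => absurd h hpass, fun _ => rfl⟩
      · rw [if_neg hgt]
        refine ⟨?_, Or.inr ⟨s, by rw [hscs], hs⟩⟩
        rw [pvRel_some]
        exact ⟨hq1, hq2⟩

-- the two folds stay related along any candidate list
lemma pvParallel (w : String) : ∀ (L : List String)
    (accA : Option (Nat × Nat × String)) (accB : Option ((Nat × Nat) × String)),
    (∀ g ∈ L, g.toList ≠ []) → pvShape w accB → pvRel accA accB →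
    pvRel (pvGCMBest w L accA) (L.foldl (fun b g => pvBStep b (pvScoreN w g)) accB) := by
  intro L
  induction L with
  | nil => intro accA accB _ _ hrel; exact hrel
  | cons x rest ih =>
    intro accA accB hne hshape hrel
    obtain ⟨hrel', hshape'⟩ :=
      pvStep_rel w x (hne x (List.mem_cons_self ..)) accA accB hshape hrel
    exact ih _ _ (fun g hg => hne g (List.mem_cons_of_mem _ hg)) hshape' hrel'

-- B's max over the scored list, in A-side language
lemma pvMax_eq (w : String) (L : List String) :
    pvMaxPair (L.map (fun g => pvScore w g)) =
    L.foldl (fun b g => pvBStep b (pvScoreN w g)) none := by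
  rw [pvMaxPair_eq_foldl, List.foldl_map]
  have h : (fun (b : Option ((Nat × Nat) × String)) (g : String) => pvBStep b (pvScore w g))
      = (fun b g => pvBStep b (pvScoreN w g)) := by
    funext b g
    rw [pvScore_eq]
    rfl
  rw [h]

-- ---- assembling body equality ----
-- proof-side names for the two bodies after normalization (definitionally equal to the ports)
def pvABody (col : String) : Option String :=
  match pvGolden.find? (fun g => col == PySem.Str.lower g) with
  | some g => some g
  | none =>
    match pvAliasScan col pvAliases with
    | some g => some g
    | none =>
      match pvGCM1 col (pvGolden.map (fun c => PySem.Str.lower c)) with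
      | some m => pvGolden.find? (fun gc => PySem.Str.lower gc == m)
      | none => none

def pvBBody (col : String) : Option String :=
  match pvTable.get? col with
  | some hit => some hit
  | none =>
    match pvMaxPair (pvGoldenLower.map (fun g => pvScore col g)) with
    | some best =>
      if 3 * best.1.2 ≤ 10 * best.1.1 then pvTable.get? best.2 else none
    | none => none

lemma pvA_eq (column : String) : fuzzy_match_column_py column =
    pvABody (PySem.Str.replace (PySem.Str.replace (PySem.Str.lower column) " " "_") "-" "_") := rfl

lemma pvB_eq (column : String) : fuzzy_match_column_py_alt column =
    pvBBody (PySem.Str.replace (PySem.Str.replace (PySem.Str.lower column) " " "_") "-" "_") := rfl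

-- mapping a fuzzy hit (one of the 28 lowered golden names) back to proper case: A's scan = B's lookup
lemma mapback_eq (m : String) (hm : m ∈ pvGoldenLower) :
    pvGolden.find? (fun gc => PySem.Str.lower gc == m) = pvTable.get? m := by
  fin_cases hm <;> decide

-- the shape of B's fold result: none only below []; otherwise the score of some candidate in L
lemma pvBFold_shape (w : String) : ∀ (L : List String) (accB : Option ((Nat × Nat) × String)),
    L.foldl (fun b g => pvBStep b (pvScoreN w g)) accB = accB ∨
    ∃ g ∈ L, L.foldl (fun b g => pvBStep b (pvScoreN w g)) accB = some (pvScoreN w g) := by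
  intro L
  induction L with
  | nil => intro accB; exact Or.inl rfl
  | cons x rest ih =>
    intro accB
    rcases ih (pvBStep accB (pvScoreN w x)) with h | ⟨g, hg, h⟩
    · rw [List.foldl_cons, h]
      cases accB with
      | none => exact Or.inr ⟨x, List.mem_cons_self .., rfl⟩
      | some q =>
        by_cases hr : pvGtPair (pvScoreN w x) q = true
        · exact Or.inr ⟨x, List.mem_cons_self .., by simp [pvBStep, hr]⟩
        · exact Or.inl (by simp [pvBStep, hr])
    · rw [List.foldl_cons, h]
      exact Or.inr ⟨g, List.mem_cons_of_mem _ hg, rfl⟩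

lemma pvBody_eq (c : String) : pvABody c = pvBBody c := by
  by_cases hmem : c ∈ pvTable.keys
  · -- c is one of the 121 table keys: both sides are closed terms, decided case by case
    rw [pvKeys_lit] at hmem
    fin_cases hmem <;> decide
  · -- c is no key: direct scan, alias scan and table lookup all miss; the fuzzy fold and the
    -- scored max stay related by pvRel, and a passing hit maps back identically
    have h1 : pvGolden.find? (fun g => c == PySem.Str.lower g) = none := by
      rw [List.find?_eq_none]
      intro g hg hp
      exact hmem (by rw [eq_of_beq hp]; exact golden_mem_keys g hg)
    have h2 : pvAliasScan c pvAliases = none := by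
      apply pvAliasScan_eq_none
      intro p hp
      obtain ⟨hk, ha⟩ := alias_mem_keys p hp
      exact ⟨fun hc => hmem (ha c hc), fun hc => hmem (hc ▸ hk)⟩
    have h3 : pvTable.get? c = none :=
      (PySem.Dict.get?_eq_none_iff_not_mem_keys pvTable c).mpr hmem
    unfold pvABody pvBBody
    rw [h1, h2, h3, pvGoldenLower_lit]
    have hrel := pvParallel c pvGoldenLower none none goldenLower_nonempty (Or.inl rfl) rfl
    rw [pvMax_eq c pvGoldenLower]
    cases hfold : pvGoldenLower.foldl (fun b g => pvBStep b (pvScoreN c g)) none with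
    | none =>
      rw [hfold] at hrel
      have : pvGCMBest c pvGoldenLower none = none := hrel
      simp only [pvGCM1, this, Option.map_none]
    | some best =>
      rw [hfold] at hrel
      obtain ⟨hp1, hp2⟩ := hrel
      by_cases hpass : 3 * best.1.2 ≤ 10 * best.1.1
      · have hA : pvGCMBest c pvGoldenLower none = some (best.1.1, best.1.2, best.2) := hp1 hpass
        simp only [pvGCM1, hA, Option.map_some, hpass, if_pos]
        apply mapback_eq
        rcases pvBFold_shape c pvGoldenLower none with h | ⟨g, hg, h⟩
        · rw [h] at hfold; exact absurd hfold (by simp)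
        · rw [h] at hfold
          have : best.2 = g := by
            have := Option.some.inj hfold
            rw [← this]
            rfl
          rw [this]; exact hg
      · have hA : pvGCMBest c pvGoldenLower none = none := hp2 hpass
        simp only [pvGCM1, hA, Option.map_none, hpass, if_false]

-- ===== VERDICT (by name: the statement is the Claim_ definition above) =====
theorem fuzzy_match_column_py_spec : Claim_equal_fuzzy_match_column_py := by
  intro column _
  unfold Spec_fuzzy_match_column_py
  rw [pvA_eq, pvB_eq]
  exact pvBody_eq _
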